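-- pv_equiv track=rewrite | github.com/rkdalsdn94/algoalgo | programmers/Lv3/Lv3_N으로_표현.py | solution
-- ===== SOURCE A (Python) =====
-- def solution(N, number):
--     S = [0, {N}]
--
--     if N == number:
--         return 1
--
--     for i in range(2, 9):
--         case = set()
--         num = int(str(N) * i)
--         case.add(num)
--
--         for j in range(1, i // 2 + 1):
--             for x in S[j]:
--                 for y in S[i - j]:
--                     case.add(x + y)
--                     case.add(x - y)
--                     case.add(y - x)
--                     case.add(x * y)
--
--                     if y != 0: case.add(x // y)
--                     if x != 0: case.add(y // x)
--
--         if number in case: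
--             return i
--         S.append(case)
--
--     return -1
-- ===== SOURCE B (Python) =====
-- def solution(N, number):
--     # Memoized recursion on the copy-count: build(i) = all values expressible
--     # with exactly i copies of N. Full range j in 1..i-1 with the four
--     # asymmetric ops replaces A's half-range with six symmetric ops.
--     memo = {}
--
--     def build(i):
--         if i in memo:
--             return memo[i]
--         if i == 1:
--             vals = {N}
--         else:
--             vals = {int(str(N) * i)}
--             for j in range(1, i):
--                 for x in build(j):
--                     for y in build(i - j):
--                         vals.add(x + y)
--                         vals.add(x - y)
--                         vals.add(x * y)
--                         if y != 0:
--                             vals.add(x // y)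
--         memo[i] = vals
--         return vals
--
--     for i in range(1, 9):
--         if number in build(i):
--             return i
--     return -1
-- ===== Notes on version B (the rewrite author's own statement) =====
-- stated objective: alternative
-- what changed: Replaces A's iterative table of reachable-value sets (half-range splits with six symmetric operations per pair) by a memoized recursion build(i) over the copy count, combining the full split range 1..i-1 with only the four asymmetric operations; the ordered scan i=1..8 subsumes A's special-cased N==number check via build(1)={N}. Pre_ excludes N < 0 with N != number, where A raises ValueError on int(str(N)*i); B raises there too.
import Mathlib
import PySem

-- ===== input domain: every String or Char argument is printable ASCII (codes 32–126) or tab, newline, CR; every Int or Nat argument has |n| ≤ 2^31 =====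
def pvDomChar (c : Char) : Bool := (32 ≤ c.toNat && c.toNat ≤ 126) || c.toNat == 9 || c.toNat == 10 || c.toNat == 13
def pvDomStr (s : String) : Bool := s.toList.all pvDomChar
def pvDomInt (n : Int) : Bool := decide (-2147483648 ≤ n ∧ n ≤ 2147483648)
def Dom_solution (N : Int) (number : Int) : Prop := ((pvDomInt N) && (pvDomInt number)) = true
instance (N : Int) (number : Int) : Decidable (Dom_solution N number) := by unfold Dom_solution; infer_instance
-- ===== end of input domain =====

-- B replaces A's iterative table of sets by a memoized recursion on the copy count,
-- combining over the full split range with four asymmetric operations instead of A's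
-- half range with six symmetric ones (objective: alternative decomposition).

-- ===== PORT A =====
-- int(str(N) * i); total form — the '.getD 0' arm is unreachable under Pre_ (str(N) parses for 0 ≤ N)
def pvRepunit (N i : Int) : Int :=
  (PySem.Int.ofChars? (PySem.List.pyRepeat (PySem.Int.toChars N) i)).getD 0

-- the six 'case.add(...)' lines of A's innermost loop body
def pvAddPairA (c : PySem.Set Int) (x y : Int) : PySem.Set Int :=
  let c1 := PySem.Set.add c (x + y)
  let c2 := PySem.Set.add c1 (x - y)
  let c3 := PySem.Set.add c2 (y - x)
  let c4 := PySem.Set.add c3 (x * y)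
  let c5 := if y ≠ 0 then PySem.Set.add c4 (PySem.Int.floordiv x y) else c4
  if x ≠ 0 then PySem.Set.add c5 (PySem.Int.floordiv y x) else c5

-- the body of one outer iteration: the set 'case' A builds for this i
-- (Python's S[0] = 0 is never indexed — j ≥ 1 and i - j ≥ 1 — so the port keeps a placeholder ∅ at index 0)
def pvCaseA (N : Int) (S : List (PySem.Set Int)) (i : Int) : PySem.Set Int :=
  (PySem.List.pyRange 1 (PySem.Int.floordiv i 2 + 1) 1).foldl (fun c j =>
    (PySem.List.pyGetD S j PySem.Set.empty).foldl (fun c x =>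
      (PySem.List.pyGetD S (i - j) PySem.Set.empty).foldl (fun c y => pvAddPairA c x y) c) c)
    (PySem.Set.add PySem.Set.empty (pvRepunit N i))

-- 'for i in range(2, 9): …' with the early return and the append to S
def pvLoopA (N number : Int) : List Int → List (PySem.Set Int) → Int
  | [], _ => -1
  | i :: rest, S =>
    let case := pvCaseA N S i
    if PySem.Set.contains case number then i
    else pvLoopA N number rest (S ++ [case])

def solution (N : Int) (number : Int) : Int :=
  if N == number then 1
  else pvLoopA N number (PySem.List.pyRange 2 9 1) [PySem.Set.empty, PySem.Set.add PySem.Set.empty N]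

-- ===== PORT B =====
-- the four 'vals.add(...)' lines of Source B's innermost loop body
def pvAddPairB (c : PySem.Set Int) (x y : Int) : PySem.Set Int :=
  let c1 := PySem.Set.add c (x + y)
  let c2 := PySem.Set.add c1 (x - y)
  let c3 := PySem.Set.add c2 (x * y)
  if y ≠ 0 then PySem.Set.add c3 (PySem.Int.floordiv x y) else c3

-- build(i) of Source B: the values expressible with exactly i copies of N
-- (the Lean port recomputes recursive calls instead of consulting Source B's memo dict — same recursion, same values)
def pvBuildB (N : Int) (i : Nat) : PySem.Set Int :=
  if i ≤ 1 then PySem.Set.add PySem.Set.empty N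
  else
    (List.range' 1 (i - 1)).attach.foldl (fun c jh =>
      (pvBuildB N jh.1).foldl (fun c x =>
        (pvBuildB N (i - jh.1)).foldl (fun c y => pvAddPairB c x y) c) c)
      (PySem.Set.add PySem.Set.empty (pvRepunit N (i : Int)))
termination_by i
decreasing_by
  · rcases jh with ⟨j, hj⟩; have := List.mem_range'_1.mp hj; simp; omega
  · rcases jh with ⟨j, hj⟩; have := List.mem_range'_1.mp hj; simp; omega

-- 'for i in range(1, 9): if number in build(i): return i' then 'return -1'
def pvScanB (N number : Int) : List Nat → Int
  | [] => -1
  | i :: rest =>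
    if PySem.Set.contains (pvBuildB N i) number then (i : Int)
    else pvScanB N number rest

def solution_alt (N : Int) (number : Int) : Int :=
  pvScanB N number (List.range' 1 8)

-- ===== PRECONDITION & SPEC =====
-- Pre_ excludes N < 0 with N ≠ number: there Python A raises ValueError on int(str(N) * i)
-- ('-3-3' is no int literal), and Python B raises the same way.
def Pre_solution (N : Int) (number : Int) : Prop := 0 ≤ N ∨ N = number
instance (N : Int) (number : Int) : Decidable (Pre_solution N number) := by unfold Pre_solution; infer_instance
def pvWitness_solution : Int × Int := (5, 12)

def Spec_solution (N : Int) (number : Int) (out : Int) : Prop := out = solution_alt N number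
instance (N : Int) (number : Int) (out : Int) : Decidable (Spec_solution N number out) := by unfold Spec_solution; infer_instance

-- ===== CLAIM (what is proved, stated in full; the proofs are below) =====
def Claim_equal_solution : Prop := ∀ (N : Int) (number : Int), Dom_solution N number → Pre_solution N number → Spec_solution N number (solution N number)

-- ===== LEMMAS AND PROOFS =====

-- the value set generated by A's six adds resp. B's four adds from a pair (x, y)
def pvOpA (x y v : Int) : Prop :=
  v = x + y ∨ v = x - y ∨ v = y - x ∨ v = x * y ∨
  (y ≠ 0 ∧ v = PySem.Int.floordiv x y) ∨ (x ≠ 0 ∧ v = PySem.Int.floordiv y x)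

def pvOpB (x y v : Int) : Prop :=
  v = x + y ∨ v = x - y ∨ v = x * y ∨ (y ≠ 0 ∧ v = PySem.Int.floordiv x y)

theorem pv_mem_addPairA (c : PySem.Set Int) (x y v : Int) :
    v ∈ pvAddPairA c x y ↔ v ∈ c ∨ pvOpA x y v := by
  unfold pvAddPairA pvOpA
  split_ifs <;> simp [PySem.Set.mem_add] <;> tauto

theorem pv_mem_addPairB (c : PySem.Set Int) (x y v : Int) :
    v ∈ pvAddPairB c x y ↔ v ∈ c ∨ pvOpB x y v := by
  unfold pvAddPairB pvOpB
  split_ifs <;> simp [PySem.Set.mem_add] <;> tauto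

theorem pv_mem_foldl {β : Type} (P : β → Int → Prop) (f : PySem.Set Int → β → PySem.Set Int)
    (hf : ∀ c b v, v ∈ f c b ↔ v ∈ c ∨ P b v) :
    ∀ (l : List β) (c : PySem.Set Int) (v : Int),
      v ∈ l.foldl f c ↔ v ∈ c ∨ ∃ b ∈ l, P b v
  | [], c, v => by simp
  | b :: t, c, v => by
    rw [List.foldl_cons, pv_mem_foldl P f hf t, hf]
    simp only [List.mem_cons]
    constructor
    · rintro ((h | h) | ⟨b', hb', h⟩)
      · exact Or.inl h
      · exact Or.inr ⟨b, Or.inl rfl, h⟩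
      · exact Or.inr ⟨b', Or.inr hb', h⟩
    · rintro (h | ⟨b', rfl | hb', h⟩)
      · exact Or.inl (Or.inl h)
      · exact Or.inl (Or.inr h)
      · exact Or.inr ⟨b', hb', h⟩

theorem pv_mem_caseA (N : Int) (S : List (PySem.Set Int)) (i : Int) (v : Int) :
    v ∈ pvCaseA N S i ↔ v = pvRepunit N i ∨
      ∃ j : Int, 1 ≤ j ∧ j < PySem.Int.floordiv i 2 + 1 ∧
        ∃ x ∈ PySem.List.pyGetD S j PySem.Set.empty,
          ∃ y ∈ PySem.List.pyGetD S (i - j) PySem.Set.empty, pvOpA x y v := by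
  unfold pvCaseA
  rw [pv_mem_foldl (fun j v => ∃ x ∈ PySem.List.pyGetD S j PySem.Set.empty,
        ∃ y ∈ PySem.List.pyGetD S (i - j) PySem.Set.empty, pvOpA x y v)]
  · simp [PySem.List.mem_pyRange_one]
    constructor
    · rintro (h | ⟨j, ⟨h1, h2⟩, h3⟩)
      · exact Or.inl h
      · exact Or.inr ⟨j, h1, h2, h3⟩
    · rintro (h | ⟨j, h1, h2, h3⟩)
      · exact Or.inl h
      · exact Or.inr ⟨j, ⟨h1, h2⟩, h3⟩
  · intro c j v
    rw [pv_mem_foldl (fun x v => ∃ y ∈ PySem.List.pyGetD S (i - j) PySem.Set.empty, pvOpA x y v)]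
    intro c x v
    rw [pv_mem_foldl (fun y v => pvOpA x y v)]
    exact fun c y v => pv_mem_addPairA c x y v

theorem pv_mem_buildB (N : Int) (i : Nat) (h2 : 2 ≤ i) (v : Int) :
    v ∈ pvBuildB N i ↔ v = pvRepunit N (i : Int) ∨
      ∃ j : Nat, 1 ≤ j ∧ j < i ∧
        ∃ x ∈ pvBuildB N j, ∃ y ∈ pvBuildB N (i - j), pvOpB x y v := by
  rw [pvBuildB]
  rw [if_neg (by omega)]
  rw [pv_mem_foldl (fun (jh : {x // x ∈ List.range' 1 (i - 1)}) v =>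
        ∃ x ∈ pvBuildB N jh.1, ∃ y ∈ pvBuildB N (i - jh.1), pvOpB x y v)]
  · simp only [PySem.Set.mem_add, List.mem_attach]
    constructor
    · rintro (h | ⟨⟨j, hj⟩, -, hx⟩)
      · simp at h; tauto
      · have := List.mem_range'_1.mp hj
        exact Or.inr ⟨j, by omega, by omega, hx⟩
    · rintro (h | ⟨j, h1, hlt, hx⟩)
      · exact Or.inl (by simp [h])
      · exact Or.inr ⟨⟨j, List.mem_range'_1.mpr (by omega)⟩, trivial, hx⟩
  · intro c jh v
    rw [pv_mem_foldl (fun x v => ∃ y ∈ pvBuildB N (i - jh.1), pvOpB x y v)]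
    intro c x v
    rw [pv_mem_foldl (fun y v => pvOpB x y v)]
    exact fun c y v => pv_mem_addPairB c x y v

theorem pvOpB_le (x y v : Int) (h : pvOpB x y v) : pvOpA x y v := by
  unfold pvOpA; unfold pvOpB at h; tauto

theorem pvOpB_swap (x y v : Int) (h : pvOpB x y v) : pvOpA y x v := by
  unfold pvOpA; unfold pvOpB at h
  rcases h with h | h | h | ⟨hy, h⟩
  · exact Or.inl (by omega)
  · exact Or.inr (Or.inr (Or.inl h))
  · exact Or.inr (Or.inr (Or.inr (Or.inl (by rw [h, mul_comm]))))
  · exact Or.inr (Or.inr (Or.inr (Or.inr (Or.inr ⟨hy, h⟩))))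

theorem pvOpA_iff (x y v : Int) : pvOpA x y v ↔ pvOpB x y v ∨ pvOpB y x v := by
  constructor
  · unfold pvOpA pvOpB
    rintro (h | h | h | h | ⟨hy, h⟩ | ⟨hx, h⟩)
    · exact Or.inl (Or.inl h)
    · exact Or.inl (Or.inr (Or.inl h))
    · exact Or.inr (Or.inr (Or.inl h))
    · exact Or.inl (Or.inr (Or.inr (Or.inl h)))
    · exact Or.inl (Or.inr (Or.inr (Or.inr ⟨hy, h⟩)))
    · exact Or.inr (Or.inr (Or.inr (Or.inr ⟨hx, h⟩)))
  · rintro (h | h)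
    · exact pvOpB_le x y v h
    · exact pvOpB_swap y x v h

-- the step: A's 'case' at count i has the same members as B's build(i),
-- provided the table entries 1..i-1 agree memberwise with build
theorem pv_case_eq_build (N : Int) (i : Nat) (S : List (PySem.Set Int))
    (h2 : 2 ≤ i) (hlen : S.length = i)
    (hS : ∀ m : Nat, 1 ≤ m → m < i → ∀ v, v ∈ S.getD m PySem.Set.empty ↔ v ∈ pvBuildB N m) :
    ∀ v, v ∈ pvCaseA N S (i : Int) ↔ v ∈ pvBuildB N i := by
  intro v
  rw [pv_mem_caseA, pv_mem_buildB N i h2]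
  have hfd : PySem.Int.floordiv (i : Int) 2 = ((i / 2 : Nat) : Int) :=
    PySem.Int.floordiv_natCast i 2
  constructor
  · rintro (h | ⟨j, hj1, hj2, x, hx, y, hy, hop⟩)
    · exact Or.inl h
    · rw [hfd] at hj2
      obtain ⟨jn, rfl⟩ : ∃ jn : Nat, j = (jn : Int) := ⟨j.toNat, by omega⟩
      have hjn1 : 1 ≤ jn := by exact_mod_cast hj1
      have hjn2 : jn ≤ i / 2 := by omega
      have hcast : (i : Int) - (jn : Int) = ((i - jn : Nat) : Int) := by omega
      rw [PySem.List.pyGetD_natCast] at hx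
      rw [hcast, PySem.List.pyGetD_natCast] at hy
      have hxB := (hS jn hjn1 (by omega) x).mp hx
      have hyB := (hS (i - jn) (by omega) (by omega) y).mp hy
      rcases (pvOpA_iff x y v).mp hop with hb | hb
      · exact Or.inr ⟨jn, hjn1, by omega, x, hxB, y, hyB, hb⟩
      · refine Or.inr ⟨i - jn, by omega, by omega, y, hyB, x, ?_, hb⟩
        have : i - (i - jn) = jn := by omega
        rw [this]; exact hxB
  · rintro (h | ⟨j, hj1, hj2, x, hx, y, hy, hop⟩)
    · exact Or.inl h
    · by_cases hhalf : j ≤ i / 2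
      · refine Or.inr ⟨(j : Int), by exact_mod_cast hj1, ?_, x, ?_, y, ?_, pvOpB_le x y v hop⟩
        · rw [hfd]; omega
        · rw [PySem.List.pyGetD_natCast]
          exact (hS j hj1 hj2 x).mpr hx
        · have hcast : (i : Int) - (j : Int) = ((i - j : Nat) : Int) := by omega
          rw [hcast, PySem.List.pyGetD_natCast]
          exact (hS (i - j) (by omega) (by omega) y).mpr hy
      · refine Or.inr ⟨((i - j : Nat) : Int), by omega, ?_, y, ?_, x, ?_, pvOpB_swap x y v hop⟩
        · rw [hfd]; omega
        · rw [PySem.List.pyGetD_natCast]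
          exact (hS (i - j) (by omega) (by omega) y).mpr hy
        · have hcast : (i : Int) - ((i - j : Nat) : Int) = (j : Int) := by omega
          rw [hcast, PySem.List.pyGetD_natCast]
          exact (hS j hj1 hj2 x).mpr hx

theorem pv_contains_congr (s t : PySem.Set Int) (h : ∀ v, v ∈ s ↔ v ∈ t) (x : Int) :
    PySem.Set.contains s x = PySem.Set.contains t x := by
  cases hc : PySem.Set.contains t x
  · rw [← Bool.not_eq_true] at hc ⊢
    rw [PySem.Set.contains_iff] at hc ⊢
    exact fun hs => hc ((h x).mp hs)
  · rw [PySem.Set.contains_iff] at hc ⊢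
    exact (h x).mpr hc

theorem pv_loop_eq (N number : Int) :
    ∀ (n k : Nat) (S : List (PySem.Set Int)), k + n = 9 → 2 ≤ k → S.length = k →
    (∀ m : Nat, 1 ≤ m → m < k → ∀ v, v ∈ S.getD m PySem.Set.empty ↔ v ∈ pvBuildB N m) →
    pvLoopA N number (PySem.List.pyRange (k : Int) 9 1) S = pvScanB N number (List.range' k n)
  | 0, k, S, hkn, hk2, hlen, hS => by
    have h9 : k = 9 := by omega
    subst h9
    rw [PySem.List.pyRange_one_eq_nil (by norm_num)]
    rfl
  | n + 1, k, S, hkn, hk2, hlen, hS => by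
    rw [PySem.List.pyRange_one_cons (by exact_mod_cast (by omega : (k : Int) < 9))]
    rw [List.range'_succ]
    rw [pvLoopA, pvScanB]
    have hstep := pv_case_eq_build N k S hk2 hlen hS
    rw [pv_contains_congr _ _ hstep number]
    by_cases hc : PySem.Set.contains (pvBuildB N k) number = true
    · rw [if_pos hc, if_pos hc]
    · rw [if_neg hc, if_neg hc]
      have hcast : (k : Int) + 1 = ((k + 1 : Nat) : Int) := by push_cast; ring
      rw [hcast]
      apply pv_loop_eq N number n (k + 1) (S ++ [pvCaseA N S (k : Int)]) (by omega) (by omega)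
        (by simp [hlen])
      intro m hm1 hm2 v
      by_cases hmk : m < k
      · rw [List.getD_eq_getElem?_getD, List.getElem?_append_left (by omega),
          ← List.getD_eq_getElem?_getD]
        exact hS m hm1 hmk v
      · have hmk' : m = k := by omega
        subst hmk'
        rw [List.getD_eq_getElem?_getD, List.getElem?_append_right (by omega)]
        simp [hlen]
        exact hstep v

theorem pv_build_one (N : Int) : pvBuildB N 1 = PySem.Set.add PySem.Set.empty N := by
  rw [pvBuildB]
  simp

-- ===== VERDICT (by name: the statement is the Claim_ definition above) =====
theorem solution_spec : Claim_equal_solution := by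
  intro N number _ _
  unfold Spec_solution solution solution_alt
  have h18 : List.range' 1 8 = 1 :: List.range' 2 7 := rfl
  rw [h18, pvScanB, pv_build_one]
  have hmem1 : ∀ v : Int, v ∈ PySem.Set.add PySem.Set.empty N ↔ v = N := by
    intro v; simp
  by_cases hN : N = number
  · rw [if_pos (by exact beq_iff_eq.mpr hN)]
    rw [if_pos (by rw [PySem.Set.contains_iff, hmem1]; exact hN.symm)]
    norm_num
  · rw [if_neg (by simp [hN])]
    rw [if_neg (by rw [Bool.not_eq_true, ← Bool.not_eq_true] at *
                   rw [PySem.Set.contains_iff, hmem1]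
                   exact fun h => hN h.symm)]
    have := pv_loop_eq N number 7 2 [PySem.Set.empty, PySem.Set.add PySem.Set.empty N]
      (by omega) (by omega) (by simp)
      (by intro m hm1 hm2 v
          have hm : m = 1 := by omega
          subst hm
          rw [pv_build_one]
          simp)
    exact_mod_cast this
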